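-- pv_equiv track=rewrite | github.com/drazeXosint/smsBomber | streak.py | getDailyBonus
-- ===== SOURCE A (Python) =====
-- MILESTONES = {
--     2:   (2,   "2-Day Streak"),
--     3:   (3,   "3-Day Streak"),
--     5:   (5,   "5-Day Streak"),
--     7:   (5,   "1 Week Warrior"),
--     10:  (7,   "10-Day Legend"),
--     14:  (10,  "2 Week Beast"),
--     21:  (15,  "3 Week Monster"),
--     30:  (20,  "1 Month Destroyer"),
--     50:  (30,  "50-Day God"),
--     100: (-1,  "100-Day UNLIMITED"),
-- }
--
-- def getDailyBonus(streak: int) -> int: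
--     """Return total permanent daily bonus earned so far."""
--     total = 0
--     for day, (bonus, _) in MILESTONES.items():
--         if streak >= day:
--             if bonus == -1:
--                 return -1  # unlimited
--             total += bonus
--     return total
-- ===== SOURCE B (Python) =====
-- import bisect
--
-- _THRESHOLDS = [2, 3, 5, 7, 10, 14, 21, 30, 50]
-- _PREFIX = [0]
-- for _b in (2, 3, 5, 5, 7, 10, 15, 20, 30):
--     _PREFIX.append(_PREFIX[-1] + _b)
--
-- def getDailyBonus(streak: int) -> int:
--     """Return total permanent daily bonus earned so far."""
--     if streak >= 100:
--         return -1  # unlimited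
--     return _PREFIX[bisect.bisect_right(_THRESHOLDS, streak)]
-- ===== Notes on version B (the rewrite author's own statement) =====
-- stated objective: alternative
-- what changed: Replaces the linear scan over the milestone dict with a precomputed prefix-sum table indexed by a binary search (bisect_right) over sorted thresholds, with an explicit check for the unlimited top milestone.
import Mathlib
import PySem

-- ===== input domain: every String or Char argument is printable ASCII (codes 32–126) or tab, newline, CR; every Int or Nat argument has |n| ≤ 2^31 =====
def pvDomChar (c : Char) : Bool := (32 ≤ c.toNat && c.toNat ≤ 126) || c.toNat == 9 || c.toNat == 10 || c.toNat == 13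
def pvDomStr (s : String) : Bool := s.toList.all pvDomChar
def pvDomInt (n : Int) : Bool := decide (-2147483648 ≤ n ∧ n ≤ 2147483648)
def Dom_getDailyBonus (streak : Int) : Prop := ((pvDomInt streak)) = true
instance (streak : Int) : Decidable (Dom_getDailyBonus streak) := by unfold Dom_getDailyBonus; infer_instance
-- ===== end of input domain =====

-- B replaces A's linear scan-with-branches over the milestone dict by a prefix-sum
-- table indexed via bisect_right over sorted thresholds (objective: alternative).

-- ===== PORT A =====
-- MILESTONES.items() in insertion order: (day, (bonus, name))
def pvMilestones : List (Int × (Int × String)) :=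
  [(2, (2, "2-Day Streak")), (3, (3, "3-Day Streak")), (5, (5, "5-Day Streak")),
   (7, (5, "1 Week Warrior")), (10, (7, "10-Day Legend")), (14, (10, "2 Week Beast")),
   (21, (15, "3 Week Monster")), (30, (20, "1 Month Destroyer")), (50, (30, "50-Day God")),
   (100, (-1, "100-Day UNLIMITED"))]

-- the for-loop with early return, as structural recursion over the items
def pvLoopA (streak : Int) : List (Int × (Int × String)) → Int → Int
  | [], total => total
  | (day, (bonus, _)) :: rest, total =>
      if streak ≥ day then
        if bonus = -1 then -1
        else pvLoopA streak rest (total + bonus)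
      else pvLoopA streak rest total

def getDailyBonus (streak : Int) : Int := pvLoopA streak pvMilestones 0

-- ===== PORT B =====
def pvThresholds : List Int := [2, 3, 5, 7, 10, 14, 21, 30, 50]
def pvPrefix : List Int := [0, 2, 5, 10, 15, 22, 32, 47, 67, 97]

-- bisect.bisect_right on a sorted list = number of elements ≤ streak
def pvBisectRight (xs : List Int) (x : Int) : Nat := xs.countP (fun t => decide (t ≤ x))

def getDailyBonus_alt (streak : Int) : Int :=
  if streak ≥ 100 then -1
  else (PySem.List.pyGetD pvPrefix ((pvBisectRight pvThresholds streak : Nat) : Int) 0)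

-- ===== PRECONDITION & SPEC =====
def Spec_getDailyBonus (streak : Int) (out : Int) : Prop := out = getDailyBonus_alt streak
instance (streak : Int) (out : Int) : Decidable (Spec_getDailyBonus streak out) := by unfold Spec_getDailyBonus; infer_instance

-- ===== CLAIM (what is proved, stated in full; the proofs are below) =====
def Claim_equal_getDailyBonus : Prop := ∀ (streak : Int), Dom_getDailyBonus streak → Spec_getDailyBonus streak (getDailyBonus streak)

-- ===== LEMMAS AND PROOFS =====

-- ===== VERDICT (by name: the statement is the Claim_ definition above) =====
theorem getDailyBonus_spec : Claim_equal_getDailyBonus := by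
  intro streak _
  unfold Spec_getDailyBonus
  rcases Int.lt_or_le streak 2 with h0 | h0
  · simp [getDailyBonus, getDailyBonus_alt, pvLoopA, pvMilestones, pvBisectRight, pvThresholds, pvPrefix, PySem.List.pyGetD, show ¬((2:Int) ≤ streak) from by omega, show ¬((3:Int) ≤ streak) from by omega, show ¬((5:Int) ≤ streak) from by omega, show ¬((7:Int) ≤ streak) from by omega, show ¬((10:Int) ≤ streak) from by omega, show ¬((14:Int) ≤ streak) from by omega, show ¬((21:Int) ≤ streak) from by omega, show ¬((30:Int) ≤ streak) from by omega, show ¬((50:Int) ≤ streak) from by omega, show ¬((100:Int) ≤ streak) from by omega]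
  rcases Int.lt_or_le streak 3 with h1 | h1
  · simp [getDailyBonus, getDailyBonus_alt, pvLoopA, pvMilestones, pvBisectRight, pvThresholds, pvPrefix, PySem.List.pyGetD, show (2:Int) ≤ streak from by omega, show ¬((3:Int) ≤ streak) from by omega, show ¬((5:Int) ≤ streak) from by omega, show ¬((7:Int) ≤ streak) from by omega, show ¬((10:Int) ≤ streak) from by omega, show ¬((14:Int) ≤ streak) from by omega, show ¬((21:Int) ≤ streak) from by omega, show ¬((30:Int) ≤ streak) from by omega, show ¬((50:Int) ≤ streak) from by omega, show ¬((100:Int) ≤ streak) from by omega]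
  rcases Int.lt_or_le streak 5 with h2 | h2
  · simp [getDailyBonus, getDailyBonus_alt, pvLoopA, pvMilestones, pvBisectRight, pvThresholds, pvPrefix, PySem.List.pyGetD, show (2:Int) ≤ streak from by omega, show (3:Int) ≤ streak from by omega, show ¬((5:Int) ≤ streak) from by omega, show ¬((7:Int) ≤ streak) from by omega, show ¬((10:Int) ≤ streak) from by omega, show ¬((14:Int) ≤ streak) from by omega, show ¬((21:Int) ≤ streak) from by omega, show ¬((30:Int) ≤ streak) from by omega, show ¬((50:Int) ≤ streak) from by omega, show ¬((100:Int) ≤ streak) from by omega]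
  rcases Int.lt_or_le streak 7 with h3 | h3
  · simp [getDailyBonus, getDailyBonus_alt, pvLoopA, pvMilestones, pvBisectRight, pvThresholds, pvPrefix, PySem.List.pyGetD, show (2:Int) ≤ streak from by omega, show (3:Int) ≤ streak from by omega, show (5:Int) ≤ streak from by omega, show ¬((7:Int) ≤ streak) from by omega, show ¬((10:Int) ≤ streak) from by omega, show ¬((14:Int) ≤ streak) from by omega, show ¬((21:Int) ≤ streak) from by omega, show ¬((30:Int) ≤ streak) from by omega, show ¬((50:Int) ≤ streak) from by omega, show ¬((100:Int) ≤ streak) from by omega]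
  rcases Int.lt_or_le streak 10 with h4 | h4
  · simp [getDailyBonus, getDailyBonus_alt, pvLoopA, pvMilestones, pvBisectRight, pvThresholds, pvPrefix, PySem.List.pyGetD, show (2:Int) ≤ streak from by omega, show (3:Int) ≤ streak from by omega, show (5:Int) ≤ streak from by omega, show (7:Int) ≤ streak from by omega, show ¬((10:Int) ≤ streak) from by omega, show ¬((14:Int) ≤ streak) from by omega, show ¬((21:Int) ≤ streak) from by omega, show ¬((30:Int) ≤ streak) from by omega, show ¬((50:Int) ≤ streak) from by omega, show ¬((100:Int) ≤ streak) from by omega]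
  rcases Int.lt_or_le streak 14 with h5 | h5
  · simp [getDailyBonus, getDailyBonus_alt, pvLoopA, pvMilestones, pvBisectRight, pvThresholds, pvPrefix, PySem.List.pyGetD, show (2:Int) ≤ streak from by omega, show (3:Int) ≤ streak from by omega, show (5:Int) ≤ streak from by omega, show (7:Int) ≤ streak from by omega, show (10:Int) ≤ streak from by omega, show ¬((14:Int) ≤ streak) from by omega, show ¬((21:Int) ≤ streak) from by omega, show ¬((30:Int) ≤ streak) from by omega, show ¬((50:Int) ≤ streak) from by omega, show ¬((100:Int) ≤ streak) from by omega]
  rcases Int.lt_or_le streak 21 with h6 | h6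
  · simp [getDailyBonus, getDailyBonus_alt, pvLoopA, pvMilestones, pvBisectRight, pvThresholds, pvPrefix, PySem.List.pyGetD, show (2:Int) ≤ streak from by omega, show (3:Int) ≤ streak from by omega, show (5:Int) ≤ streak from by omega, show (7:Int) ≤ streak from by omega, show (10:Int) ≤ streak from by omega, show (14:Int) ≤ streak from by omega, show ¬((21:Int) ≤ streak) from by omega, show ¬((30:Int) ≤ streak) from by omega, show ¬((50:Int) ≤ streak) from by omega, show ¬((100:Int) ≤ streak) from by omega]
  rcases Int.lt_or_le streak 30 with h7 | h7
  · simp [getDailyBonus, getDailyBonus_alt, pvLoopA, pvMilestones, pvBisectRight, pvThresholds, pvPrefix, PySem.List.pyGetD, show (2:Int) ≤ streak from by omega, show (3:Int) ≤ streak from by omega, show (5:Int) ≤ streak from by omega, show (7:Int) ≤ streak from by omega, show (10:Int) ≤ streak from by omega, show (14:Int) ≤ streak from by omega, show (21:Int) ≤ streak from by omega, show ¬((30:Int) ≤ streak) from by omega, show ¬((50:Int) ≤ streak) from by omega, show ¬((100:Int) ≤ streak) from by omega]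
  rcases Int.lt_or_le streak 50 with h8 | h8
  · simp [getDailyBonus, getDailyBonus_alt, pvLoopA, pvMilestones, pvBisectRight, pvThresholds, pvPrefix, PySem.List.pyGetD, show (2:Int) ≤ streak from by omega, show (3:Int) ≤ streak from by omega, show (5:Int) ≤ streak from by omega, show (7:Int) ≤ streak from by omega, show (10:Int) ≤ streak from by omega, show (14:Int) ≤ streak from by omega, show (21:Int) ≤ streak from by omega, show (30:Int) ≤ streak from by omega, show ¬((50:Int) ≤ streak) from by omega, show ¬((100:Int) ≤ streak) from by omega]
  rcases Int.lt_or_le streak 100 with h9 | h9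
  · simp [getDailyBonus, getDailyBonus_alt, pvLoopA, pvMilestones, pvBisectRight, pvThresholds, pvPrefix, PySem.List.pyGetD, show (2:Int) ≤ streak from by omega, show (3:Int) ≤ streak from by omega, show (5:Int) ≤ streak from by omega, show (7:Int) ≤ streak from by omega, show (10:Int) ≤ streak from by omega, show (14:Int) ≤ streak from by omega, show (21:Int) ≤ streak from by omega, show (30:Int) ≤ streak from by omega, show (50:Int) ≤ streak from by omega, show ¬((100:Int) ≤ streak) from by omega]
  simp [getDailyBonus, getDailyBonus_alt, pvLoopA, pvMilestones, pvBisectRight, pvThresholds, pvPrefix, PySem.List.pyGetD, show (2:Int) ≤ streak from by omega, show (3:Int) ≤ streak from by omega, show (5:Int) ≤ streak from by omega, show (7:Int) ≤ streak from by omega, show (10:Int) ≤ streak from by omega, show (14:Int) ≤ streak from by omega, show (21:Int) ≤ streak from by omega, show (30:Int) ≤ streak from by omega, show (50:Int) ≤ streak from by omega, show (100:Int) ≤ streak from by omega]
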